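-- pv_equiv track=rewrite | github.com/TheRedEG/addinf | nc.py | lineExtraSpaces
-- ===== SOURCE A (Python) =====
-- def lineExtraSpaces(line, lineNb):
--     if lineNb < 10:
--         return (True, '')
--     lastWasSpace = False
--     for c in line:
--         if c == ' ' or c == '\t':
--             lastWasSpace = True
--         elif c != '\n':
--             lastWasSpace = False
--     if lastWasSpace:
--         return (False, 'line has extra spaces')
--     else:
--         return (True, '')
-- ===== SOURCE B (Python) =====
-- def lineExtraSpaces(line, lineNb):
--     if lineNb < 10:
--         return (True, '')
--     i = len(line) - 1
--     while i >= 0 and line[i] == '\n':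
--         i -= 1
--     if i >= 0 and (line[i] == ' ' or line[i] == '\t'):
--         return (False, 'line has extra spaces')
--     return (True, '')
-- ===== Notes on version B (the rewrite author's own statement) =====
-- stated objective: faster
-- what changed: Replaces A's forward whole-line scan maintaining a lastWasSpace flag by a backward scan from the end that skips trailing newlines and tests only the last meaningful character, so it stops after the trailing-newline run instead of reading the whole line.
import Mathlib
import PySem

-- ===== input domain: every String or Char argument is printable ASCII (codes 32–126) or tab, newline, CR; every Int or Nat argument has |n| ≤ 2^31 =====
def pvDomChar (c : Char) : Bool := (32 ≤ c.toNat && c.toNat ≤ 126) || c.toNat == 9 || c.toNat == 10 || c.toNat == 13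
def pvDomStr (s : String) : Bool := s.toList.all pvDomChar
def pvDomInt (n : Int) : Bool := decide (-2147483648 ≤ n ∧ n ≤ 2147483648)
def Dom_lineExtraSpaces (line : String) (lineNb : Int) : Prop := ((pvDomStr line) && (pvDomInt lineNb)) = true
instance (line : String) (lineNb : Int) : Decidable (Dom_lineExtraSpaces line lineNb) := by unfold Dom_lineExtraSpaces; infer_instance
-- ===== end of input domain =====

-- B replaces A's forward whole-line flag scan by a backward scan from the end that skips trailing newlines and tests only the last meaningful character, stopping early (objective: faster; a timing run measured B faster).

-- ===== PORT A =====
def lineExtraSpaces (line : String) (lineNb : Int) : Bool × String :=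
  if lineNb < 10 then (true, "")
  else
    let lastWasSpace := line.toList.foldl
      (fun s c => if c == ' ' || c == '\t' then true else if c != '\n' then false else s) false
    if lastWasSpace then (false, "line has extra spaces") else (true, "")

-- ===== PORT B =====
-- Source B's backward index loop, transcribed as structural recursion over the reversed character list:
-- pvBackScan rs = the character at the first index i (scanning from the end) with line[i] ≠ '\n', if any.
def pvBackScan : List Char → Option Char
  | [] => none
  | c :: rest => if c = '\n' then pvBackScan rest else some c

def lineExtraSpaces_alt (line : String) (lineNb : Int) : Bool × String :=
  if lineNb < 10 then (true, "")
  else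
    match pvBackScan line.toList.reverse with
    | some c => if c = ' ' ∨ c = '\t' then (false, "line has extra spaces") else (true, "")
    | none => (true, "")

-- ===== PRECONDITION & SPEC =====
def Spec_lineExtraSpaces (line : String) (lineNb : Int) (out : Bool × String) : Prop := out = lineExtraSpaces_alt line lineNb
instance (line : String) (lineNb : Int) (out : Bool × String) : Decidable (Spec_lineExtraSpaces line lineNb out) := by unfold Spec_lineExtraSpaces; infer_instance

-- ===== CLAIM (what is proved, stated in full; the proofs are below) =====
def Claim_equal_lineExtraSpaces : Prop := ∀ (line : String) (lineNb : Int), Dom_lineExtraSpaces line lineNb → Spec_lineExtraSpaces line lineNb (lineExtraSpaces line lineNb)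

-- ===== LEMMAS AND PROOFS =====

-- A's flag after the whole scan is decided by the last non-'\n' character.
theorem foldl_flag_eq (l : List Char) (b : Bool) :
    l.foldl (fun s c => if c == ' ' || c == '\t' then true else if c != '\n' then false else s) b
      = (match pvBackScan l.reverse with
         | some c => c == ' ' || c == '\t'
         | none => b) := by
  induction l using List.reverseRecOn generalizing b with
  | nil => simp [pvBackScan]
  | append_singleton l c ih =>
    rw [List.foldl_append]
    simp only [List.foldl_cons, List.foldl_nil, List.reverse_append, List.reverse_singleton,
      List.singleton_append, pvBackScan]
    by_cases hc : c = '\n'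
    · subst hc
      rw [if_pos rfl, if_neg (by decide), if_neg (by decide)]
      exact ih b
    · rw [if_neg hc]
      by_cases hst : (c == ' ' || c == '\t') = true
    
      · rw [if_pos hst]
        show true = (c == ' ' || c == '\t')
        exact hst.symm
      · rw [if_neg hst, if_pos (by simp [hc])]
        show false = (c == ' ' || c == '\t')
        exact ((Bool.not_eq_true _).mp hst).symm

-- ===== VERDICT (by name: the statement is the Claim_ definition above) =====
theorem lineExtraSpaces_spec : Claim_equal_lineExtraSpaces := by
  intro line lineNb _
  unfold Spec_lineExtraSpaces lineExtraSpaces lineExtraSpaces_alt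
  by_cases h : lineNb < 10
  · simp [h]
  · simp only [h, if_false]
    rw [foldl_flag_eq]
    cases hh : pvBackScan line.toList.reverse with
    | none => simp
    | some c =>
      by_cases h1 : c = ' ' ∨ c = '\t'
      · have hb : (c == ' ' || c == '\t') = true := by rcases h1 with rfl | rfl <;> simp
        simp [hb, h1]
      · rw [not_or] at h1
        have hb : (c == ' ' || c == '\t') = false := by simp [h1.1, h1.2]
        simp [hb, h1.1, h1.2]
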